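-- pv_equiv track=rewrite | github.com/juancarov/Parcial1Lenguajes | punto1.py | afd
-- ===== SOURCE A (Python) =====
-- def afd(cadena):
--     estado = 'q0'
--     finales = {'q0','q1','q2','q3'}
--
--     for simbolo in cadena:
--         if estado == 'q0':
--             if simbolo == 'a':
--                 estado = 'q1'
--             elif simbolo == 'b':
--                 estado = 'q2'
--             elif simbolo == 'c':
--                 estado = 'q3'
--             else:
--                 return 'No acepta'
--
--         elif estado == 'q1':
--             if simbolo == 'a':
--                 estado = 'q1'
--             elif simbolo == 'b':
--                 estado = 'q2'
--             elif simbolo == 'c':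
--                 estado = 'q3'
--             else:
--                 return 'No acepta'
--
--         elif estado == 'q2':
--             if simbolo == 'b':
--                 estado = 'q2'
--             elif simbolo == 'c':
--                 estado = 'q3'
--             else:
--                 return 'No acepta'
--
--         elif estado == 'q3':
--             if simbolo == 'c':
--                 estado = 'q3'
--             else:
--                 return 'No acepta'
--
--     return 'acepta' if estado in finales else 'no acepta'
-- ===== SOURCE B (Python) =====
-- import re
--
-- _PAT = re.compile(r'a*b*c*')
--
-- def afd(cadena):
--     return 'acepta' if _PAT.fullmatch(cadena) else 'No acepta'
-- ===== Notes on version B (the rewrite author's own statement) =====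
-- stated objective: idiomatic
-- what changed: Replaces the hand-written per-character state machine with a single declarative regex fullmatch against a*b*c*; the C regex engine scans the string instead of a Python-level loop.
import Mathlib
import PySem

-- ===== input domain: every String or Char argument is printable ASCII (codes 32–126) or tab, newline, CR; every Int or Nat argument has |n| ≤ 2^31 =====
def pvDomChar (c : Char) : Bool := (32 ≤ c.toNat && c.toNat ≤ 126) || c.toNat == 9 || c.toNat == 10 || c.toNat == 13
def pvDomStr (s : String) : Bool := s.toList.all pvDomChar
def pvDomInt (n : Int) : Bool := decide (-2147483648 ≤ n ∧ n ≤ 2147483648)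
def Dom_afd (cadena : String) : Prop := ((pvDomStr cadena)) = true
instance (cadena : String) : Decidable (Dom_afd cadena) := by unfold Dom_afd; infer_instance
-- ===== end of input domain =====

-- B replaces the hand-written state machine with a declarative a*b*c* pattern match (idiomatic; same return strings).
-- ===== PORT A =====
-- literal transliteration of A's loop: state 'estado' threaded through the characters,
-- early return 'No acepta' on a bad symbol, final membership test in finales.
def afdGo : List Char → String → String
  | [], estado => if estado = "q0" ∨ estado = "q1" ∨ estado = "q2" ∨ estado = "q3" then "acepta" else "no acepta"
  | simbolo :: rest, estado =>
    if estado = "q0" then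
      if simbolo = 'a' then afdGo rest "q1"
      else if simbolo = 'b' then afdGo rest "q2"
      else if simbolo = 'c' then afdGo rest "q3"
      else "No acepta"
    else if estado = "q1" then
      if simbolo = 'a' then afdGo rest "q1"
      else if simbolo = 'b' then afdGo rest "q2"
      else if simbolo = 'c' then afdGo rest "q3"
      else "No acepta"
    else if estado = "q2" then
      if simbolo = 'b' then afdGo rest "q2"
      else if simbolo = 'c' then afdGo rest "q3"
      else "No acepta"
    else if estado = "q3" then
      if simbolo = 'c' then afdGo rest "q3"
      else "No acepta"
    else if estado = "q0" ∨ estado = "q1" ∨ estado = "q2" ∨ estado = "q3" then "acepta" else "no acepta"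

def afd (cadena : String) : String := afdGo cadena.toList "q0"

-- ===== PORT B =====
-- hand port of re.fullmatch(r'a*b*c*', cadena): each starred literal matches greedily
-- (exact here since 'a','b','c' are distinct literals, so greedy never backtracks);
-- the whole string matches iff nothing remains after the three greedy runs.
def afd_alt (cadena : String) : String :=
  let r := ((cadena.toList.dropWhile (· = 'a')).dropWhile (· = 'b')).dropWhile (· = 'c')
  if r.isEmpty then "acepta" else "No acepta"
-- ===== PRECONDITION & SPEC =====
def Spec_afd (cadena : String) (out : String) : Prop := out = afd_alt cadena
instance (cadena : String) (out : String) : Decidable (Spec_afd cadena out) := by unfold Spec_afd; infer_instance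

-- ===== CLAIM (what is proved, stated in full; the proofs are below) =====
def Claim_equal_afd : Prop := ∀ (cadena : String), Dom_afd cadena → Spec_afd cadena (afd cadena)

-- ===== LEMMAS AND PROOFS =====
theorem afdGo_q3 (l : List Char) :
    afdGo l "q3" = if (l.dropWhile (· = 'c')).isEmpty then "acepta" else "No acepta" := by
  induction l with
  | nil => simp [afdGo]
  | cons c rest ih =>
    by_cases hc : c = 'c' <;> simp [afdGo, hc, List.dropWhile, ih]

theorem afdGo_q2 (l : List Char) :
    afdGo l "q2" =
      if (((l.dropWhile (· = 'b')).dropWhile (· = 'c'))).isEmpty then "acepta" else "No acepta" := by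
  induction l with
  | nil => simp [afdGo]
  | cons c rest ih =>
    by_cases hb : c = 'b'
    · simp [afdGo, hb, List.dropWhile, ih]
    · by_cases hc : c = 'c'
      · simp [afdGo, hb, hc, List.dropWhile, afdGo_q3]
      · simp [afdGo, hb, hc, List.dropWhile]

theorem afdGo_q1 (l : List Char) :
    afdGo l "q1" =
      if ((((l.dropWhile (· = 'a')).dropWhile (· = 'b')).dropWhile (· = 'c'))).isEmpty
      then "acepta" else "No acepta" := by
  induction l with
  | nil => simp [afdGo]
  | cons c rest ih =>
    by_cases ha : c = 'a'
    · simp [afdGo, ha, List.dropWhile, ih]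
    · by_cases hb : c = 'b'
      · simp [afdGo, ha, hb, List.dropWhile, afdGo_q2]
      · by_cases hc : c = 'c'
        · simp [afdGo, ha, hb, hc, List.dropWhile, afdGo_q3]
        · simp [afdGo, ha, hb, hc, List.dropWhile]

theorem afdGo_q0 (l : List Char) : afdGo l "q0" = afdGo l "q1" := by
  cases l with
  | nil => simp [afdGo]
  | cons c rest => simp [afdGo]

-- ===== VERDICT (by name: the statement is the Claim_ definition above) =====
theorem afd_spec : Claim_equal_afd := by
  intro cadena _
  unfold Spec_afd afd afd_alt
  rw [afdGo_q0, afdGo_q1]
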